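-- pv_equiv track=rewrite | github.com/nooktung/myFEvent | AI-gentask/services/rag_engine.py | extract_best_practices
-- ===== SOURCE A (Python) =====
-- from typing import List, Dict, Any, Optional
--
-- def extract_best_practices(similar_events: List[Dict[str, Any]]) -> Dict[str, List[str]]:
--     """
--     Extract best practices from similar events
--
--     Returns:
--         Dict with key_tasks, lessons_learned, special_requirements
--     """
--
--     best_practices = {
--         "key_tasks": [],
--         "lessons_learned": [],
--         "special_requirements": []
--     }
--
--     for event_dict in similar_events:
--         event = event_dict["event"]
--
--         # Collect key tasks
--         best_practices["key_tasks"].extend(event.get("key_tasks", []))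
--
--         # Collect lessons learned
--         best_practices["lessons_learned"].extend(event.get("lessons_learned", []))
--
--         # Collect special requirements
--         best_practices["special_requirements"].extend(event.get("special_requirements", []))
--
--     # Remove duplicates while preserving order
--     for key in best_practices:
--         best_practices[key] = list(dict.fromkeys(best_practices[key]))
--
--     return best_practices
-- ===== SOURCE B (Python) =====
-- def extract_best_practices(similar_events):
--     key_tasks, lessons_learned, special_requirements = [], [], []
--     seen_kt, seen_ll, seen_sr = set(), set(), set()
--     for event_dict in similar_events:
--         event = event_dict["event"]
--         for item in event.get("key_tasks", []):
--             if item not in seen_kt: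
--                 seen_kt.add(item)
--                 key_tasks.append(item)
--         for item in event.get("lessons_learned", []):
--             if item not in seen_ll:
--                 seen_ll.add(item)
--                 lessons_learned.append(item)
--         for item in event.get("special_requirements", []):
--             if item not in seen_sr:
--                 seen_sr.add(item)
--                 special_requirements.append(item)
--     return {
--         "key_tasks": key_tasks,
--         "lessons_learned": lessons_learned,
--         "special_requirements": special_requirements,
--     }
-- ===== Notes on version B (the rewrite author's own statement) =====
-- stated objective: alternative
-- what changed: A collects all items into per-key lists and deduplicates afterwards with dict.fromkeys; B does one streaming pass that appends an item only if it is not in a per-key seen set, so no second dedup phase exists.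
import Mathlib
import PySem

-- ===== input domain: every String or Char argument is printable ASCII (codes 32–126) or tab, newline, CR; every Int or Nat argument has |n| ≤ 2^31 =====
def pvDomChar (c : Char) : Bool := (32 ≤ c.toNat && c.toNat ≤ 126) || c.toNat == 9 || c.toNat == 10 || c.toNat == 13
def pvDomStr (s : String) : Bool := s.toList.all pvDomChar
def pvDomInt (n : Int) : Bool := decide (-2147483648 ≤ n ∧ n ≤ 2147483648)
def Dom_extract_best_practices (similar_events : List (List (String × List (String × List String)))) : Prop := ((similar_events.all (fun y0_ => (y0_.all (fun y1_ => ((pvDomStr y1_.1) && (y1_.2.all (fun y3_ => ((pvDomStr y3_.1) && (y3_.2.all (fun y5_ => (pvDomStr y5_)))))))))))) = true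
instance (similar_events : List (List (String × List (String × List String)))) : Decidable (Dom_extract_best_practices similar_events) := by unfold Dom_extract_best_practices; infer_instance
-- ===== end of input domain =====

-- B replaces A's collect-then-dedup (extend all lists, then list(dict.fromkeys(...)) per key)
-- by a single streaming pass with per-key seen-sets; objective: alternative decomposition.

-- ===== PORT A =====
def extract_best_practices (similar_events : List (List (String × List (String × List String)))) : List (String × List String) :=
  let bp : PySem.Dict String (List String) :=
    PySem.Dict.mk [("key_tasks", []), ("lessons_learned", []), ("special_requirements", [])]
  let bp := similar_events.foldl (fun bp ed =>
    -- event = event_dict["event"]  (KeyError when the key is absent: excluded by Pre_)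
    let ev : PySem.Dict String (List String) :=
      PySem.Dict.mk (((PySem.Dict.mk ed).get? "event").getD [])
    let bp := bp.modify "key_tasks" [] (fun l => l ++ ev.getD "key_tasks" [])
    let bp := bp.modify "lessons_learned" [] (fun l => l ++ ev.getD "lessons_learned" [])
    bp.modify "special_requirements" [] (fun l => l ++ ev.getD "special_requirements" [])) bp
  let bp := bp.keys.foldl (fun d k => d.insert k (PySem.List.dedup (d.getD k []))) bp
  bp.items

-- ===== PORT B =====
-- inner loop of B: append each item not yet in the seen set, adding it to the set
def pvAddNew (acc : List String × PySem.Set String) (items : List String) :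
    List String × PySem.Set String :=
  items.foldl (fun a item =>
    if PySem.Set.contains a.2 item then a
    else (a.1 ++ [item], PySem.Set.add a.2 item)) acc

def extract_best_practices_alt (similar_events : List (List (String × List (String × List String)))) : List (String × List String) :=
  let st := similar_events.foldl
    (fun (st : (List String × PySem.Set String) × (List String × PySem.Set String) ×
               (List String × PySem.Set String)) ed =>
      let ev : PySem.Dict String (List String) :=
        PySem.Dict.mk (((PySem.Dict.mk ed).get? "event").getD [])
      (pvAddNew st.1 (ev.getD "key_tasks" []),
       pvAddNew st.2.1 (ev.getD "lessons_learned" []),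
       pvAddNew st.2.2 (ev.getD "special_requirements" [])))
    (([], PySem.Set.empty), ([], PySem.Set.empty), ([], PySem.Set.empty))
  [("key_tasks", st.1.1), ("lessons_learned", st.2.1.1), ("special_requirements", st.2.2.1)]

-- ===== PRECONDITION & SPEC =====
-- Pre_ excludes exactly the inputs on which Python A raises KeyError: some event_dict lacks the key "event".
def Pre_extract_best_practices (similar_events : List (List (String × List (String × List String)))) : Prop :=
  similar_events.all (fun ed => ed.any (fun p => p.1 == "event")) = true
instance (similar_events : List (List (String × List (String × List String)))) : Decidable (Pre_extract_best_practices similar_events) := by unfold Pre_extract_best_practices; infer_instance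
def pvWitness_extract_best_practices : (List (List (String × List (String × List String)))) :=
  [[("event", [("key_tasks", ["a", "b", "a"]), ("lessons_learned", ["c"])])],
   [("event", [("key_tasks", ["b"]), ("special_requirements", ["d"])])]]

def Spec_extract_best_practices (similar_events : List (List (String × List (String × List String)))) (out : List (String × List String)) : Prop := out = extract_best_practices_alt similar_events
instance (similar_events : List (List (String × List (String × List String)))) (out : List (String × List String)) : Decidable (Spec_extract_best_practices similar_events out) := by unfold Spec_extract_best_practices; infer_instance

-- ===== CLAIM (what is proved, stated in full; the proofs are below) =====
def Claim_equal_extract_best_practices : Prop := ∀ (similar_events : List (List (String × List (String × List String)))), Dom_extract_best_practices similar_events → Pre_extract_best_practices similar_events → Spec_extract_best_practices similar_events (extract_best_practices similar_events)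

-- ===== LEMMAS AND PROOFS =====

-- the list of items A/B collect for key k from one event_dict
def pvChunk (k : String) (ed : List (String × List (String × List String))) : List String :=
  (PySem.Dict.mk (((PySem.Dict.mk ed).get? "event").getD [])).getD k []

def pvFlat (k : String) (se : List (List (String × List (String × List String)))) : List String :=
  (se.map (pvChunk k)).flatten

-- B's inner loop, started on a diagonal (list = seen set), is Set.update on both components
lemma pvAddNew_diag (items : List String) (s : List String) :
    pvAddNew (s, s) items = (PySem.Set.update s items, PySem.Set.update s items) := by
  induction items generalizing s with
  | nil => simp [pvAddNew, PySem.Set.update_nil]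
  | cons x xs ih =>
    have hstep : (if PySem.Set.contains s x then (s, s)
        else (s ++ [x], PySem.Set.add s x)) = (PySem.Set.add s x, PySem.Set.add s x) := by
      by_cases h : x ∈ s
      · simp [h]
      · simp [h]
    show List.foldl _ _ (x :: xs) = _
    rw [List.foldl_cons]
    show List.foldl _ (if PySem.Set.contains s x then (s, s)
        else (s ++ [x], PySem.Set.add s x)) xs = _
    rw [hstep, PySem.Set.update_cons]
    exact ih (PySem.Set.add s x)

-- one step of A's fold on the literal three-key dict
lemma pvStepA_eval (l1 l2 l3 : List String) (ed : List (String × List (String × List String))) :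
    (let ev : PySem.Dict String (List String) :=
       PySem.Dict.mk (((PySem.Dict.mk ed).get? "event").getD []);
     let bp := (PySem.Dict.mk [("key_tasks", l1), ("lessons_learned", l2), ("special_requirements", l3)]).modify "key_tasks" [] (fun l => l ++ ev.getD "key_tasks" []);
     let bp := bp.modify "lessons_learned" [] (fun l => l ++ ev.getD "lessons_learned" []);
     bp.modify "special_requirements" [] (fun l => l ++ ev.getD "special_requirements" []))
    = PySem.Dict.mk [("key_tasks", l1 ++ pvChunk "key_tasks" ed),
        ("lessons_learned", l2 ++ pvChunk "lessons_learned" ed),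
        ("special_requirements", l3 ++ pvChunk "special_requirements" ed)] := by
  rfl

-- A's main fold, fully characterised
lemma pvFoldA_eval (se : List (List (String × List (String × List String)))) (l1 l2 l3 : List String) :
    se.foldl (fun bp ed =>
      let ev : PySem.Dict String (List String) :=
        PySem.Dict.mk (((PySem.Dict.mk ed).get? "event").getD [])
      let bp := bp.modify "key_tasks" [] (fun l => l ++ ev.getD "key_tasks" [])
      let bp := bp.modify "lessons_learned" [] (fun l => l ++ ev.getD "lessons_learned" [])
      bp.modify "special_requirements" [] (fun l => l ++ ev.getD "special_requirements" []))
      (PySem.Dict.mk [("key_tasks", l1), ("lessons_learned", l2), ("special_requirements", l3)])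
    = PySem.Dict.mk [("key_tasks", l1 ++ pvFlat "key_tasks" se),
        ("lessons_learned", l2 ++ pvFlat "lessons_learned" se),
        ("special_requirements", l3 ++ pvFlat "special_requirements" se)] := by
  induction se generalizing l1 l2 l3 with
  | nil => simp [pvFlat]
  | cons ed rest ih =>
    rw [List.foldl_cons]
    rw [show (let ev : PySem.Dict String (List String) :=
        PySem.Dict.mk (((PySem.Dict.mk ed).get? "event").getD [])
      let bp := (PySem.Dict.mk [("key_tasks", l1), ("lessons_learned", l2), ("special_requirements", l3)]).modify "key_tasks" [] (fun l => l ++ ev.getD "key_tasks" [])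
      let bp := bp.modify "lessons_learned" [] (fun l => l ++ ev.getD "lessons_learned" [])
      bp.modify "special_requirements" [] (fun l => l ++ ev.getD "special_requirements" []))
      = PySem.Dict.mk [("key_tasks", l1 ++ pvChunk "key_tasks" ed),
          ("lessons_learned", l2 ++ pvChunk "lessons_learned" ed),
          ("special_requirements", l3 ++ pvChunk "special_requirements" ed)] from pvStepA_eval l1 l2 l3 ed]
    rw [ih]
    simp [pvFlat, List.append_assoc]

-- A's final dedup loop on the literal three-key dict
lemma pvDedupLoop_eval (c1 c2 c3 : List String) :
    ((PySem.Dict.mk [("key_tasks", c1), ("lessons_learned", c2), ("special_requirements", c3)]).keys.foldl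
      (fun d k => d.insert k (PySem.List.dedup (d.getD k [])))
      (PySem.Dict.mk [("key_tasks", c1), ("lessons_learned", c2), ("special_requirements", c3)])).items
    = [("key_tasks", PySem.List.dedup c1), ("lessons_learned", PySem.List.dedup c2),
       ("special_requirements", PySem.List.dedup c3)] := by
  rfl

-- B's main fold, fully characterised
lemma pvFoldB_eval (se : List (List (String × List (String × List String)))) (a b c : List String) :
    se.foldl (fun (st : (List String × PySem.Set String) × (List String × PySem.Set String) ×
               (List String × PySem.Set String)) ed =>
      (pvAddNew st.1 ((PySem.Dict.mk (((PySem.Dict.mk ed).get? "event").getD [])).getD "key_tasks" []),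
       pvAddNew st.2.1 ((PySem.Dict.mk (((PySem.Dict.mk ed).get? "event").getD [])).getD "lessons_learned" []),
       pvAddNew st.2.2 ((PySem.Dict.mk (((PySem.Dict.mk ed).get? "event").getD [])).getD "special_requirements" [])))
      ((a, a), (b, b), (c, c))
    = ((PySem.Set.update a (pvFlat "key_tasks" se), PySem.Set.update a (pvFlat "key_tasks" se)),
       (PySem.Set.update b (pvFlat "lessons_learned" se), PySem.Set.update b (pvFlat "lessons_learned" se)),
       (PySem.Set.update c (pvFlat "special_requirements" se), PySem.Set.update c (pvFlat "special_requirements" se))) := by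
  induction se generalizing a b c with
  | nil => simp [pvFlat, PySem.Set.update_nil]
  | cons ed rest ih =>
    rw [List.foldl_cons]
    show List.foldl _
      (pvAddNew (a, a) (pvChunk "key_tasks" ed),
       pvAddNew (b, b) (pvChunk "lessons_learned" ed),
       pvAddNew (c, c) (pvChunk "special_requirements" ed)) rest = _
    rw [pvAddNew_diag, pvAddNew_diag, pvAddNew_diag]
    rw [ih]
    simp [pvFlat, PySem.Set.update_append]

-- ===== VERDICT (by name: the statement is the Claim_ definition above) =====
theorem extract_best_practices_spec : Claim_equal_extract_best_practices := by
  intro se _ _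
  show extract_best_practices se = extract_best_practices_alt se
  unfold extract_best_practices extract_best_practices_alt
  simp only [PySem.Set.empty]
  rw [pvFoldA_eval, pvFoldB_eval]
  rw [pvDedupLoop_eval]
  simp [PySem.List.dedup_eq_ofList, PySem.Set.update_nil_left]
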